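-- pv_equiv track=rewrite | github.com/JiniousChoi/encyclopedia-in-code | quizzes/00.organize.me/Cracking the Coding Interview/9-8.py | coin_procedural
-- ===== SOURCE A (Python) =====
-- def coin_procedural(n):
--     result=[]
--     for q in range(n//25+1):
--         left1=n-q*25
--         for d in range(left1//10+1):
--             left2=left1-d*10
--             for ni in range(left2//5+1):
--                 pe=left2-ni*5
--                 result.append([q,d,ni,pe])
--     return result
-- ===== SOURCE B (Python) =====
-- def coin_procedural(n):
--     coins = [25, 10, 5, 1]
--     result = []
--
--     def helper(i, amount, prefix):
--         if i == len(coins) - 1: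
--             result.append(prefix + [amount])
--             return
--         c = coins[i]
--         for k in range(amount // c + 1):
--             helper(i + 1, amount - k * c, prefix + [k])
--
--     helper(0, n, [])
--     return result
-- ===== Notes on version B (the rewrite author's own statement) =====
-- stated objective: alternative
-- what changed: Replaces the three hard-coded nested loops with a recursive enumerator over the denomination list [25,10,5,1]: helper(i, amount, prefix) loops over the count for coin i and recurses, emitting prefix+[amount] at the penny base case.
import Mathlib
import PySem

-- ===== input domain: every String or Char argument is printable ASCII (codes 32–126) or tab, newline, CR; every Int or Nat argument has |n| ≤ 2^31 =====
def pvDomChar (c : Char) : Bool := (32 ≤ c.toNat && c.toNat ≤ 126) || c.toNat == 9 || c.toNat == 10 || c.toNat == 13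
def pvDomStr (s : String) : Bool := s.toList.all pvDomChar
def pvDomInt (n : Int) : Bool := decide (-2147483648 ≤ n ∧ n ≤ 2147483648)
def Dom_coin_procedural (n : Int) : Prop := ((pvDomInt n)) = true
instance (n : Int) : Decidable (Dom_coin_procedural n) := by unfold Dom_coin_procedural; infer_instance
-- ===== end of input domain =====

-- B replaces A's three hard-coded nested loops by a recursive enumerator over the denomination
-- list (same output, same order); objective: alternative decomposition.

-- ===== PORT A =====
def coin_procedural (n : Int) : List (List Int) :=
  (PySem.List.pyRange 0 (PySem.Int.floordiv n 25 + 1) 1).foldl (fun result q =>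
    let left1 := n - q * 25
    (PySem.List.pyRange 0 (PySem.Int.floordiv left1 10 + 1) 1).foldl (fun result d =>
      let left2 := left1 - d * 10
      (PySem.List.pyRange 0 (PySem.Int.floordiv left2 5 + 1) 1).foldl (fun result ni =>
        let pe := left2 - ni * 5
        result ++ [[q, d, ni, pe]]) result) result) []

-- ===== PORT B =====
-- helper(i, amount, pfx) of Source B; the remaining suffix coins[i:] is passed as a list.
def coinHelperB : List Int → Int → List Int → List (List Int)
  | [], amount, pfx => [pfx ++ [amount]]      -- unreachable: coins never empties before the base case
  | [_], amount, pfx => [pfx ++ [amount]]     -- i == len(coins)-1: append pfx + [amount]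
  | c :: c' :: rest, amount, pfx =>
      (PySem.List.pyRange 0 (PySem.Int.floordiv amount c + 1) 1).foldl
        (fun acc k => acc ++ coinHelperB (c' :: rest) (amount - k * c) (pfx ++ [k])) []

def coin_procedural_alt (n : Int) : List (List Int) :=
  coinHelperB [25, 10, 5, 1] n []

-- ===== PRECONDITION & SPEC =====
def Spec_coin_procedural (n : Int) (out : List (List Int)) : Prop := out = coin_procedural_alt n
instance (n : Int) (out : List (List Int)) : Decidable (Spec_coin_procedural n out) := by unfold Spec_coin_procedural; infer_instance

-- ===== CLAIM (what is proved, stated in full; the proofs are below) =====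
def Claim_equal_coin_procedural : Prop := ∀ (n : Int), Dom_coin_procedural n → Spec_coin_procedural n (coin_procedural n)

-- ===== LEMMAS AND PROOFS =====

theorem coinHelperB_last (amount : Int) (pfx : List Int) :
    coinHelperB [1] amount pfx = [pfx ++ [amount]] := rfl

theorem coinHelperB_cons (c c' : Int) (rest : List Int) (amount : Int) (pfx : List Int) :
    coinHelperB (c :: c' :: rest) amount pfx
      = (PySem.List.pyRange 0 (PySem.Int.floordiv amount c + 1) 1).flatMap
          (fun k => coinHelperB (c' :: rest) (amount - k * c) (pfx ++ [k])) := by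
  show (PySem.List.pyRange 0 (PySem.Int.floordiv amount c + 1) 1).foldl
        (fun acc k => acc ++ coinHelperB (c' :: rest) (amount - k * c) (pfx ++ [k])) [] = _
  rw [PySem.List.foldl_append_eq_flatMap]
  simp

theorem flatMap_single {a b : Type} (f : a -> b) (l : List a) :
    l.flatMap (fun x => [f x]) = l.map f := by
  induction l with
  | nil => rfl
  | cons x xs ih => simp [ih]

-- ===== VERDICT (by name: the statement is the Claim_ definition above) =====
theorem coin_procedural_spec : Claim_equal_coin_procedural := by
  intro n _
  show coin_procedural n = coin_procedural_alt n
  unfold coin_procedural coin_procedural_alt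
  simp only [PySem.List.foldl_append_singleton_eq_map, PySem.List.foldl_append_eq_flatMap,
    List.nil_append]
  rw [coinHelperB_cons]
  apply List.flatMap_congr; intro q _
  rw [coinHelperB_cons]
  apply List.flatMap_congr; intro d _
  rw [coinHelperB_cons]
  simp only [coinHelperB_last]
  exact (flatMap_single _ _).symm
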